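-- pv_equiv track=rewrite | github.com/vanox-david/distill-financial-model | src/visualization.py | generate_quarterly_labels
-- ===== SOURCE A (Python) =====
-- from typing import List, Tuple, Optional
--
-- def generate_quarterly_labels(months: int, start_year: int = 2025, start_quarter: int = 4) -> List[str]:
--     """
--     Generate quarterly labels for x-axis.
--
--     Args:
--         months: Number of months to generate labels for
--         start_year: Starting year (default 2025)
--         start_quarter: Starting quarter (default Q4)
--
--     Returns:
--         List of quarterly labels like ['2025Q4', '2026Q1', '2026Q2', ...]
--     """
--     labels = []
--     current_year = start_year
--     current_quarter = start_quarter
--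
--     for month in range(months):
--         labels.append(f"{current_year}Q{current_quarter}")
--
--         # Move to next quarter every 3 months
--         if (month + 1) % 3 == 0:
--             current_quarter += 1
--             if current_quarter > 4:
--                 current_quarter = 1
--                 current_year += 1
--
--     return labels
-- ===== SOURCE B (Python) =====
-- def generate_quarterly_labels(months: int, start_year: int = 2025, start_quarter: int = 4) -> list:
--     # Loop per quarter: emit one label string per quarter block (up to 3 copies),
--     # advancing year/quarter lazily like the original.
--     labels = []
--     year = start_year
--     quarter = start_quarter
--     while len(labels) < months:
--         label = f"{year}Q{quarter}"
--         labels.extend([label] * min(3, months - len(labels)))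
--         quarter += 1
--         if quarter > 4:
--             quarter = 1
--             year += 1
--     return labels
-- ===== Notes on version B (the rewrite author's own statement) =====
-- stated objective: alternative
-- what changed: B iterates once per quarter block in a while loop, building each label string once and appending min(3, months-len) copies, instead of A's per-month loop that re-formats the same label every month; the lazy increment-then-wrap quarter advance is kept.
import Mathlib
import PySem

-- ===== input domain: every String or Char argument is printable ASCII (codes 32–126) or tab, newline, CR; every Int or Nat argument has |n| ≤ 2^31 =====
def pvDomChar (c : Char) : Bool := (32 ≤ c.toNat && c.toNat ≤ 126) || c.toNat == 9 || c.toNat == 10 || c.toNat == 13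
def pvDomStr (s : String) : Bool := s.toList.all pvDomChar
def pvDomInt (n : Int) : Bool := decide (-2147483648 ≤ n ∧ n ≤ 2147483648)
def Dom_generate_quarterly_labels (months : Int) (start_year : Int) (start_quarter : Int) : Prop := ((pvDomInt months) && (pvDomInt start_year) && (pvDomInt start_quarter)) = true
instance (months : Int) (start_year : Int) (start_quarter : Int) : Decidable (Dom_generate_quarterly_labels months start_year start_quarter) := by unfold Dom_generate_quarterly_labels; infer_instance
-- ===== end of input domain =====

-- B loops once per QUARTER block (building each label string once and appending up to 3
-- copies) instead of A's per-month loop; objective: alternative decomposition, same behaviour.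

-- ===== PORT A =====
-- one iteration of A's per-month loop: append a label, then maybe advance the quarter
def pvStepA (st : List String × Int × Int) (month : Int) : List String × Int × Int :=
  let labels := st.1 ++ [PySem.Int.toStr st.2.1 ++ "Q" ++ PySem.Int.toStr st.2.2]
  if PySem.Int.mod (month + 1) 3 == 0 then
    let q := st.2.2 + 1
    if q > 4 then (labels, st.2.1 + 1, 1) else (labels, st.2.1, q)
  else (labels, st.2.1, st.2.2)

def generate_quarterly_labels (months : Int) (start_year : Int) (start_quarter : Int) : List String :=
  ((PySem.List.pyRange 0 months 1).foldl pvStepA ([], start_year, start_quarter)).1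

-- ===== PORT B =====
-- Source B's `while len(labels) < months` loop; `remaining` is months - len(labels).
-- The first argument is FUEL, a totality guard only: the loop emits ≥ 1 label per
-- iteration, so fuel = initial remaining always suffices and the guard never fires.
def pvAltGo : Nat → Nat → Int → Int → List String
  | 0, _, _, _ => []
  | _ + 1, 0, _, _ => []
  | f + 1, r + 1, year, quarter =>
    let label := PySem.Int.toStr year ++ "Q" ++ PySem.Int.toStr quarter
    let k := min 3 (r + 1)
    List.replicate k label ++
      (if quarter + 1 > 4 then pvAltGo f (r + 1 - k) (year + 1) 1
       else pvAltGo f (r + 1 - k) year (quarter + 1))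

def generate_quarterly_labels_alt (months : Int) (start_year : Int) (start_quarter : Int) : List String :=
  pvAltGo months.toNat months.toNat start_year start_quarter

-- ===== PRECONDITION & SPEC =====
def Spec_generate_quarterly_labels (months : Int) (start_year : Int) (start_quarter : Int) (out : List String) : Prop := out = generate_quarterly_labels_alt months start_year start_quarter
instance (months : Int) (start_year : Int) (start_quarter : Int) (out : List String) : Decidable (Spec_generate_quarterly_labels months start_year start_quarter out) := by unfold Spec_generate_quarterly_labels; infer_instance

-- ===== CLAIM (what is proved, stated in full; the proofs are below) =====
def Claim_equal_generate_quarterly_labels : Prop := ∀ (months : Int) (start_year : Int) (start_quarter : Int), Dom_generate_quarterly_labels months start_year start_quarter → Spec_generate_quarterly_labels months start_year start_quarter (generate_quarterly_labels months start_year start_quarter)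

-- ===== LEMMAS AND PROOFS =====

-- A's step with the month index as a Nat (the indices range(months) produces)
def pvStepN (st : List String × Int × Int) (k : Nat) : List String × Int × Int :=
  let labels := st.1 ++ [PySem.Int.toStr st.2.1 ++ "Q" ++ PySem.Int.toStr st.2.2]
  if (k + 1) % 3 = 0 then
    if st.2.2 + 1 > 4 then (labels, st.2.1 + 1, 1) else (labels, st.2.1, st.2.2 + 1)
  else (labels, st.2.1, st.2.2)

theorem pvStepA_natCast (st : List String × Int × Int) (k : Nat) :
    pvStepA st (k : Int) = pvStepN st k := by
  have h : PySem.Int.mod ((k : Int) + 1) 3 = (((k + 1) % 3 : Nat) : Int) := by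
    exact_mod_cast PySem.Int.mod_natCast (k + 1) 3
  simp only [pvStepA, pvStepN, h]
  by_cases hk : (k + 1) % 3 = 0
  · simp [hk]
  · simp [hk]
    intro hd
    exfalso
    omega

theorem pvAltGo_zero (f : Nat) (y q : Int) : pvAltGo f 0 y q = [] := by
  cases f <;> simp [pvAltGo]

-- main invariant: folding A's step over r consecutive month indices starting at a
-- multiple of 3 appends exactly B's quarter-block output (fuel f suffices when r ≤ f)
theorem pvMain (f : Nat) : ∀ (r : Nat), r ≤ f → ∀ (i : Nat), i % 3 = 0 →
    ∀ (y q : Int) (labels : List String),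
    ((List.range' i r).foldl pvStepN (labels, y, q)).1 = labels ++ pvAltGo f r y q := by
  induction f with
  | zero =>
    intro r hr i _ y q labels
    interval_cases r
    simp [List.range', pvAltGo]
  | succ f IH =>
    intro r hr i hi y q labels
    match r with
    | 0 => simp [List.range', pvAltGo]
    | 1 =>
      have h1 : (i + 1) % 3 ≠ 0 := by omega
      simp [List.range', pvStepN, pvAltGo, h1, pvAltGo_zero]
    | 2 =>
      have h1 : (i + 1) % 3 ≠ 0 := by omega
      have h2 : (i + 1 + 1) % 3 ≠ 0 := by omega
      simp [List.range', pvStepN, pvAltGo, h1, h2, pvAltGo_zero]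
    | (s + 3) =>
      have hr3 : List.range' i (s + 3) = i :: (i + 1) :: (i + 2) :: List.range' (i + 3) s := by
        simp [List.range'_succ]
      have h1 : (i + 1) % 3 ≠ 0 := by omega
      have h2 : (i + 1 + 1) % 3 ≠ 0 := by omega
      have h3 : (i + 2 + 1) % 3 = 0 := by omega
      have hIH := IH s (by omega) (i + 3) (by omega)
      set lab := PySem.Int.toStr y ++ "Q" ++ PySem.Int.toStr q with hlab
      have e1 : pvStepN (labels, y, q) i = (labels ++ [lab], y, q) := by
        simp [pvStepN, h1, hlab]
      have e2 : pvStepN (labels ++ [lab], y, q) (i + 1) = (labels ++ [lab] ++ [lab], y, q) := by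
        simp [pvStepN, h2, hlab]
      have hgo : pvAltGo (f + 1) (s + 3) y q
          = lab :: lab :: lab ::
            (if q + 1 > 4 then pvAltGo f s (y + 1) 1 else pvAltGo f s y (q + 1)) := by
        show List.replicate (min 3 (s + 2 + 1)) lab ++ _ = _
        have hmin : min 3 (s + 2 + 1) = 3 := by omega
        have hsub : s + 2 + 1 - 3 = s := by omega
        rw [hmin, hsub]
        rfl
      by_cases hq : q + 1 > 4
      · have e3 : pvStepN (labels ++ [lab] ++ [lab], y, q) (i + 2)
            = (labels ++ [lab] ++ [lab] ++ [lab], y + 1, 1) := by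
          simp [pvStepN, h3, hq, hlab]
        rw [hr3]
        simp only [List.foldl_cons, e1, e2, e3]
        rw [hIH (y + 1) 1 (labels ++ [lab] ++ [lab] ++ [lab]), hgo]
        simp [hq]
      · have e3 : pvStepN (labels ++ [lab] ++ [lab], y, q) (i + 2)
            = (labels ++ [lab] ++ [lab] ++ [lab], y, q + 1) := by
          simp [pvStepN, h3, hq, hlab]
        rw [hr3]
        simp only [List.foldl_cons, e1, e2, e3]
        rw [hIH y (q + 1) (labels ++ [lab] ++ [lab] ++ [lab]), hgo]
        simp [hq]

-- ===== VERDICT (by name: the statement is the Claim_ definition above) =====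
theorem generate_quarterly_labels_spec : Claim_equal_generate_quarterly_labels := by
  unfold Claim_equal_generate_quarterly_labels
  intro months sy sq _
  unfold Spec_generate_quarterly_labels generate_quarterly_labels generate_quarterly_labels_alt
  by_cases hm : months ≤ 0
  · rw [PySem.List.pyRange_one_eq_nil hm]
    simp [Int.toNat_of_nonpos hm, pvAltGo_zero]
  · rw [PySem.List.pyRange_one (a := 0) (b := months)]
    rw [List.foldl_map]
    have hf : (fun (st : List String × Int × Int) (k : Nat) => pvStepA st ((0 : Int) + (k : Int)))
        = pvStepN := by
      funext st k
      rw [zero_add, pvStepA_natCast]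
    rw [hf]
    have hrange : List.range (months - 0).toNat = List.range' 0 months.toNat := by
      simp [List.range_eq_range']
    rw [hrange]
    have h := pvMain months.toNat months.toNat le_rfl 0 (by omega) sy sq []
    simpa using h
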